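-- pv_equiv track=rewrite | github.com/baconkev000/v1swivl-backend | accounts/views.py | _assign_saved_prompts_to_selected_topics
-- ===== SOURCE A (Python) =====
-- def _assign_saved_prompts_to_selected_topics(
--     prompt_texts: list[str],
--     topics: list[str],
-- ) -> dict[str, list[str]]:
--     """Round-robin assign flat saved prompts onto topic tabs (same shape as onboarding UI)."""
--     topics_list = [str(t).strip() for t in topics if str(t).strip()]
--     out: dict[str, list[str]] = {t: [] for t in topics_list}
--     if not topics_list:
--         return out
--     clean = [str(p).strip() for p in prompt_texts if str(p).strip()]
--     for i, p in enumerate(clean):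
--         out[topics_list[i % len(topics_list)]].append(p)
--     return out
-- ===== SOURCE B (Python) =====
-- def _assign_saved_prompts_to_selected_topics(
--     prompt_texts: list[str],
--     topics: list[str],
-- ) -> dict[str, list[str]]:
--     """Round-robin via per-topic strided comprehension instead of a prompt loop with modulo."""
--     topics_list = [str(t).strip() for t in topics if str(t).strip()]
--     if not topics_list:
--         return {}
--     clean = [str(p).strip() for p in prompt_texts if str(p).strip()]
--     n = len(topics_list)
--     return {t: [clean[i] for i in range(j, len(clean), n)]
--             for j, t in enumerate(topics_list)}
-- ===== Notes on version B (the rewrite author's own statement) =====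
-- stated objective: alternative
-- what changed: Instead of looping over prompts and appending via i % n into a pre-built dict, B builds the dict in one comprehension over the topics, giving topic j the strided sublist clean[j], clean[j+n], ... directly.
-- outside the precondition, e.g. on _assign_saved_prompts_to_selected_topics(['a', 'b', 'c'], ['t', 't']): A returns {'t': ['a', 'b', 'c']}, B returns {'t': ['b']}
import Mathlib
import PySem

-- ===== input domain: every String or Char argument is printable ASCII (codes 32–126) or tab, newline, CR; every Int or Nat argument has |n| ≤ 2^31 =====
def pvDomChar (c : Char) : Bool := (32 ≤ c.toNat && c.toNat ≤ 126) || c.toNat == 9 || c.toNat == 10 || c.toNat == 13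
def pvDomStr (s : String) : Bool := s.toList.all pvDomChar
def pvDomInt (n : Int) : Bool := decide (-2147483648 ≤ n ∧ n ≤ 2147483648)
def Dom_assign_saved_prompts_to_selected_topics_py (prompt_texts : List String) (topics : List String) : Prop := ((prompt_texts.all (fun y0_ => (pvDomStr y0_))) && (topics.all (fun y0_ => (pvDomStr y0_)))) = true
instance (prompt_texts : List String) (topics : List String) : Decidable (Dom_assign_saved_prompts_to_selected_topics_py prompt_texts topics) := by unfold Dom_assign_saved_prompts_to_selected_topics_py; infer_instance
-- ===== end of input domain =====

-- B replaces A's prompt loop with `i % n` appends by a per-topic dict comprehension over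
-- strided index ranges (alternative decomposition, same cost); return value only, no mutation.

-- shared list-comprehension helper: [str(x).strip() for x in xs if str(x).strip()]
def pvClean (xs : List String) : List String :=
  (xs.map PySem.Str.strip).filter (fun s => s ≠ "")

-- ===== PORT A =====
-- In A, `out[topics_list[i % len(topics_list)]].append(p)`: the key is always present
-- (i % len < len), so Dict.modify with default [] is exact, and the in-range
-- subscript is List.getD (never out of range since i % len < len = topics_list.length).
def assign_saved_prompts_to_selected_topics_py (prompt_texts : List String) (topics : List String) : List (String × List String) :=
  let topics_list := pvClean topics
  let out : PySem.Dict String (List String) :=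
    topics_list.foldl (fun d t => d.insert t []) PySem.Dict.empty
  if topics_list = [] then out.items
  else
    let clean := pvClean prompt_texts
    (clean.zipIdx.foldl
      (fun d pi =>
        d.modify (topics_list.getD (pi.2 % topics_list.length) "") [] (fun v => v ++ [pi.1]))
      out).items

-- ===== PORT B =====
-- dict comprehension over enumerate(topics_list); each value is
-- [clean[i] for i in range(j, len(clean), n)] (in-range subscript: PySem.List.pyGetD).
def assign_saved_prompts_to_selected_topics_py_alt (prompt_texts : List String) (topics : List String) : List (String × List String) :=
  let topics_list := pvClean topics
  if topics_list = [] then []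
  else
    let clean := pvClean prompt_texts
    let n := topics_list.length
    (topics_list.zipIdx.foldl
      (fun d tj =>
        d.insert tj.1
          ((PySem.List.pyRange (tj.2 : Int) (clean.length : Int) (n : Int)).map
            (fun i => PySem.List.pyGetD clean i "")))
      PySem.Dict.empty).items

-- ===== PRECONDITION & SPEC =====
-- Pre_ excludes topic lists whose cleaned (stripped, nonempty) topics contain duplicates:
-- there the dict key is accidental — A merges a duplicated topic's round-robin shares by
-- interleaved appends while B's comprehension keyed by the topic keeps the last strided slice;
-- both are defensible readings of a duplicate key.
def Pre_assign_saved_prompts_to_selected_topics_py (prompt_texts : List String) (topics : List String) : Prop :=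
  ((topics.map PySem.Str.strip).filter (fun s => s ≠ "")).Nodup
instance (prompt_texts : List String) (topics : List String) : Decidable (Pre_assign_saved_prompts_to_selected_topics_py prompt_texts topics) := by unfold Pre_assign_saved_prompts_to_selected_topics_py; infer_instance

def pvWitness_assign_saved_prompts_to_selected_topics_py : List String × List String :=
  (["a", "b", "c"], ["x", " y "])

def Spec_assign_saved_prompts_to_selected_topics_py (prompt_texts : List String) (topics : List String) (out : List (String × List String)) : Prop := out = assign_saved_prompts_to_selected_topics_py_alt prompt_texts topics
instance (prompt_texts : List String) (topics : List String) (out : List (String × List String)) : Decidable (Spec_assign_saved_prompts_to_selected_topics_py prompt_texts topics out) := by unfold Spec_assign_saved_prompts_to_selected_topics_py; infer_instance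

-- ===== CLAIM (what is proved, stated in full; the proofs are below) =====
def Claim_equal_assign_saved_prompts_to_selected_topics_py : Prop := ∀ (prompt_texts : List String) (topics : List String), Dom_assign_saved_prompts_to_selected_topics_py prompt_texts topics → Pre_assign_saved_prompts_to_selected_topics_py prompt_texts topics → Spec_assign_saved_prompts_to_selected_topics_py prompt_texts topics (assign_saved_prompts_to_selected_topics_py prompt_texts topics)

-- ===== LEMMAS AND PROOFS =====

-- the sublist of cs picked by A's loop for residue class j, counter starting at i
def pvSel (n j : Nat) : Nat → List String → List String
  | _, [] => []
  | i, c :: cs => (if i % n = j then [c] else []) ++ pvSel n j (i + 1) cs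

theorem pvSel_append (n j : Nat) (xs ys : List String) :
    ∀ i, pvSel n j i (xs ++ ys) = pvSel n j i xs ++ pvSel n j (i + xs.length) ys := by
  induction xs with
  | nil => intro i; simp [pvSel]
  | cons c cs ih =>
    intro i
    simp only [List.cons_append, pvSel, ih (i + 1), List.length_cons, List.append_assoc]
    ring_nf

theorem pvSel_add_n (n j : Nat) (cs : List String) :
    ∀ i, pvSel n j (i + n) cs = pvSel n j i cs := by
  induction cs with
  | nil => intro i; rfl
  | cons c cs ih =>
    intro i
    simp only [pvSel, Nat.add_mod_right]
    rw [show i + n + 1 = (i + 1) + n by ring, ih (i + 1)]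

theorem pvSel_short (n j : Nat) (hj : j < n) :
    ∀ (xs : List String) (i : Nat), i + xs.length ≤ n →
      pvSel n j i xs = if i ≤ j ∧ j < i + xs.length then [xs.getD (j - i) ""] else [] := by
  intro xs
  induction xs with
  | nil => intro i _; simp [pvSel]
  | cons c cs ih =>
    intro i hle
    simp only [List.length_cons] at hle
    have hi : i < n := by omega
    have hmod : i % n = i := Nat.mod_eq_of_lt hi
    by_cases hij : i = j
    · subst hij
      rw [show pvSel n i i (c :: cs) = (if i % n = i then [c] else []) ++ pvSel n i (i + 1) cs
        from rfl]
      rw [hmod, if_pos rfl, ih (i + 1) (by omega), if_neg (by omega),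
        if_pos (by simp only [List.length_cons]; omega)]
      simp
    · simp only [pvSel, hmod, if_neg hij, List.nil_append]
      rw [ih (i + 1) (by omega)]
      simp only [List.length_cons]
      by_cases hc : i + 1 ≤ j ∧ j < i + 1 + cs.length
      · rw [if_pos hc, if_pos (by omega)]
        have : j - i = (j - (i + 1)) + 1 := by omega
        rw [this, List.getD_cons_succ]
      · rw [if_neg hc, if_neg (by omega)]

theorem pvSel_chunk (n j : Nat) (hn : 0 < n) (hj : j < n) (cs : List String) :
    pvSel n j 0 cs = if j < cs.length then cs.getD j "" :: pvSel n j 0 (cs.drop n) else [] := by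
  by_cases hlen : j < cs.length
  · rw [if_pos hlen]
    by_cases hns : cs.length ≤ n
    · rw [pvSel_short n j hj cs 0 (by omega), if_pos (by omega),
        List.drop_eq_nil_of_le hns]
      simp [pvSel]
    · conv_lhs => rw [← List.take_append_drop n cs]
      rw [pvSel_append, pvSel_short n j hj (cs.take n) 0
          (by simp only [List.length_take, Nat.zero_add]; omega),
        if_pos (by simp only [List.length_take, Nat.zero_add]; omega)]
      have htk : (cs.take n).length = n := by
        simp only [List.length_take]; omega
      rw [htk, pvSel_add_n]
      have : (cs.take n).getD (j - 0) "" = cs.getD j "" := by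
        simp only [Nat.sub_zero, List.getD, List.getElem?_take, if_pos hj]
      rw [this]
      rfl
  · rw [if_neg hlen]
    rw [pvSel_short n j hj cs 0 (by omega), if_neg (by omega)]

-- A's modify-loop, at key ts[j], appends exactly pvSel
theorem pvFoldA_getD (ts : List String) (hnd : ts.Nodup) (j : Nat) (hj : j < ts.length) :
    ∀ (cs : List String) (i : Nat) (d : PySem.Dict String (List String)),
      ((cs.zipIdx i).foldl
        (fun d pi => d.modify (ts.getD (pi.2 % ts.length) "") [] (fun v => v ++ [pi.1]))
        d).getD (ts.getD j "") []
      = d.getD (ts.getD j "") [] ++ pvSel ts.length j i cs := by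
  intro cs
  induction cs with
  | nil => intro i d; simp [pvSel]
  | cons c cs ih =>
    intro i d
    rw [List.zipIdx_cons, List.foldl_cons, ih (i + 1)]
    have hm : i % ts.length < ts.length := Nat.mod_lt _ (by omega)
    rw [PySem.Dict.getD_modify]
    rw [List.getD_eq_getElem ts "" hj, List.getD_eq_getElem ts "" hm]
    have hunf : pvSel ts.length j i (c :: cs)
        = (if i % ts.length = j then [c] else []) ++ pvSel ts.length j (i + 1) cs := rfl
    rw [hunf]
    by_cases hc : i % ts.length = j
    · have hts : ts[j] = ts[i % ts.length] := by simp only [hc]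
      rw [if_pos hts, if_pos hc, ← hts]
      simp
    · have hts : ¬ ts[j] = ts[i % ts.length] := fun h =>
        hc (hnd.getElem_inj_iff.mp h).symm
      rw [if_neg hts, if_neg hc]
      simp

-- A's modify-loop never changes the key list (every key it touches is already present)
theorem pvFoldA_keys (ts : List String) :
    ∀ (cs : List String) (i : Nat) (d : PySem.Dict String (List String)), d.keys = ts → ts ≠ [] →
      ((cs.zipIdx i).foldl
        (fun d pi => d.modify (ts.getD (pi.2 % ts.length) "") [] (fun v => v ++ [pi.1]))
        d).keys = ts := by
  intro cs
  induction cs with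
  | nil => intro i d hd _; simpa using hd
  | cons c cs ih =>
    intro i d hd hne
    rw [List.zipIdx_cons, List.foldl_cons]
    apply ih (i + 1)
    · have hm : i % ts.length < ts.length := Nat.mod_lt _ (by
        cases ts with | nil => exact absurd rfl hne | cons _ _ => simp)
      have hmem : ts.getD (i % ts.length) "" ∈ ts := by
        rw [List.getD_eq_getElem ts "" hm]; exact List.getElem_mem hm
      have hcont : d.contains (ts.getD (i % ts.length) "") = true := by
        rw [PySem.Dict.contains_iff_mem_keys, hd]; exact hmem
      rw [PySem.Dict.keys_modify, PySem.Dict.keys_insert_of_contains _ _ hcont, hd]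
    · exact hne

-- the number of indices range(j, len, n) yields, as a Nat
def pvCnt (n j len : Nat) : Nat := if j < len then (len - j + n - 1) / n else 0

theorem pvRange_map_eq (n j : Nat) (hn : 0 < n) (cs : List String) :
    (PySem.List.pyRange (j : Int) (cs.length : Int) (n : Int)).map
      (fun i => PySem.List.pyGetD cs i "")
    = (List.range (pvCnt n j cs.length)).map (fun k => cs.getD (j + n * k) "") := by
  rw [PySem.List.pyRange_of_pos (j : Int) (cs.length : Int) (by exact_mod_cast hn)]
  rw [List.map_map]
  have hcnt : (if (j : Int) < (cs.length : Int) then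
      (((cs.length : Int) - j + n - 1) / n).toNat else 0) = pvCnt n j cs.length := by
    unfold pvCnt
    by_cases h : j < cs.length
    · rw [if_pos (by exact_mod_cast h), if_pos h]
      have : ((cs.length : Int) - j + n - 1) = ((cs.length - j + n - 1 : Nat) : Int) := by
        omega
      rw [this]
      exact Nat.add_zero _
    · rw [if_neg (by exact_mod_cast h), if_neg h]
  rw [hcnt]
  apply List.map_congr_left
  intro k _
  simp only [Function.comp_apply]
  have : (j : Int) + (n : Int) * (k : Int) = ((j + n * k : Nat) : Int) := by push_cast; ring
  rw [this, PySem.List.pyGetD_natCast]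

theorem pvCnt_succ (n j len : Nat) (hn : 0 < n) (h : j < len) :
    pvCnt n j len = pvCnt n j (len - n) + 1 := by
  unfold pvCnt
  rw [if_pos h]
  by_cases h2 : j < len - n
  · rw [if_pos h2]
    have : len - j + n - 1 = (len - n - j + n - 1) + n := by omega
    rw [this, Nat.add_div_right _ hn]
  · rw [if_neg h2]
    have h1 : (len - j + n - 1) / n = 1 := Nat.div_eq_of_lt_le (by omega) (by omega)
    omega

theorem pvSel_eq_range (n j : Nat) (hn : 0 < n) (hj : j < n) :
    ∀ (len : Nat) (cs : List String), cs.length = len →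
      pvSel n j 0 cs = (List.range (pvCnt n j cs.length)).map (fun k => cs.getD (j + n * k) "") := by
  intro len
  induction len using Nat.strong_induction_on with
  | _ len ih =>
    intro cs hcs
    rw [pvSel_chunk n j hn hj cs]
    by_cases h : j < cs.length
    · rw [if_pos h]
      have hne : cs ≠ [] := by intro hc; subst hc; simp at h
      have hdl : (cs.drop n).length = cs.length - n := by simp
      have htail : (List.range (pvCnt n j (cs.length - n))).map
            (fun k => (cs.drop n).getD (j + n * k) "")
          = (List.range (pvCnt n j (cs.length - n))).map
            ((fun k => cs.getD (j + n * k) "") ∘ (fun k => k + 1)) := by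
        refine List.map_congr_left (fun k hk => ?_)
        simp only [Function.comp_apply, List.getD, List.getElem?_drop]
        rw [show n + (j + n * k) = j + n * (k + 1) by rw [Nat.mul_succ]; omega]
      rw [ih (cs.drop n).length (by rw [hdl]; omega) (cs.drop n) rfl, hdl, htail,
        pvCnt_succ n j cs.length hn h, List.range_succ_eq_map, List.map_cons, List.map_map]
      simp
    · rw [if_neg h]
      unfold pvCnt
      rw [if_neg h]
      rfl

-- ===== VERDICT helper: pointwise equality of the two item lists =====
theorem pv_main (prompt_texts topics : List String)
    (hnd : ((topics.map PySem.Str.strip).filter (fun s => s ≠ "")).Nodup) :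
    assign_saved_prompts_to_selected_topics_py prompt_texts topics
    = assign_saved_prompts_to_selected_topics_py_alt prompt_texts topics := by
  unfold assign_saved_prompts_to_selected_topics_py assign_saved_prompts_to_selected_topics_py_alt
  have hnd' : (pvClean topics).Nodup := hnd
  by_cases hts : pvClean topics = []
  · simp only [hts]
    rfl
  · simp only [if_neg hts]
    set ts := pvClean topics with hts_def
    set cs := pvClean prompt_texts with hcs_def
    have hn : 0 < ts.length := by
      cases h : ts with
      | nil => exact absurd h hts
      | cons _ _ => simp [h]
    -- initial dict of A
    have h0items : (ts.foldl (fun d t => d.insert t ([] : List String)) PySem.Dict.empty).items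
        = ts.map (fun t => (t, ([] : List String))) := by
      have := PySem.Dict.items_foldl_insert_fresh (l := ts) (k := fun t => t)
        (v := fun _ => ([] : List String)) (d := PySem.Dict.empty)
        (by intro a _; exact PySem.Dict.contains_empty a) (by simpa using hnd')
      simpa using this
    have h0keys : (ts.foldl (fun d t => d.insert t ([] : List String)) PySem.Dict.empty).keys
        = ts := by
      show ((ts.foldl (fun d t => d.insert t ([] : List String)) PySem.Dict.empty).items.map
        (fun p => p.1)) = ts
      rw [h0items, List.map_map]
      simp [Function.comp_def]
    -- final dict of A
    set dF := (cs.zipIdx.foldl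
      (fun d pi => d.modify (ts.getD (pi.2 % ts.length) "") [] (fun v => v ++ [pi.1]))
      (ts.foldl (fun d t => d.insert t ([] : List String)) PySem.Dict.empty)) with hdF
    have hFkeys : dF.keys = ts := by
      rw [hdF]
      exact pvFoldA_keys ts cs 0 _ h0keys hts
    have hFitems : dF.items = ts.map (fun t => (t, dF.getD t [])) := by
      rw [PySem.Dict.items_eq_map_keys dF (by rw [hFkeys]; exact hnd') ([] : List String), hFkeys]
    -- B's dict
    have hBitems : ((ts.zipIdx.foldl
        (fun d tj => d.insert tj.1
          ((PySem.List.pyRange (tj.2 : Int) (cs.length : Int) (ts.length : Int)).map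
            (fun i => PySem.List.pyGetD cs i "")))
        PySem.Dict.empty)).items
        = ts.zipIdx.map (fun tj => (tj.1,
            (PySem.List.pyRange (tj.2 : Int) (cs.length : Int) (ts.length : Int)).map
              (fun i => PySem.List.pyGetD cs i ""))) := by
      have := PySem.Dict.items_foldl_insert_fresh (l := ts.zipIdx)
        (k := fun tj => tj.1)
        (v := fun tj => (PySem.List.pyRange (tj.2 : Int) (cs.length : Int) (ts.length : Int)).map
          (fun i => PySem.List.pyGetD cs i ""))
        (d := PySem.Dict.empty)
        (by intro a _; exact PySem.Dict.contains_empty a.1)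
        (by rw [show (ts.zipIdx.map fun tj => tj.1) = ts from List.zipIdx_map_fst 0 ts]
            exact hnd')
      simpa using this
    show dF.items = _
    rw [hFitems, hBitems]
    apply List.ext_getElem?
    intro j
    simp only [List.getElem?_map, List.getElem?_zipIdx, Nat.zero_add, Option.map_map]
    by_cases hjts : j < ts.length
    · have hd0 : (ts.foldl (fun d t => d.insert t ([] : List String))
          PySem.Dict.empty).getD (ts.getD j "") [] = [] := by
        apply PySem.Dict.getD_of_mem_items
        · rw [h0items, List.getD_eq_getElem ts "" hjts]
          exact List.mem_map_of_mem (List.getElem_mem hjts)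
        · rw [h0keys]; exact hnd'
      have hval : dF.getD (ts[j]'hjts) []
          = (PySem.List.pyRange (j : Int) (cs.length : Int) (ts.length : Int)).map
              (fun i => PySem.List.pyGetD cs i "") := by
        rw [show (ts[j]'hjts) = ts.getD j "" from (List.getD_eq_getElem ts "" hjts).symm]
        rw [hdF, pvFoldA_getD ts hnd' j hjts cs 0, hd0, List.nil_append]
        rw [pvSel_eq_range ts.length j hn hjts cs.length cs rfl,
          ← pvRange_map_eq ts.length j hn cs]
      rw [List.getElem?_eq_getElem hjts]
      simp only [Option.map_some, Function.comp_apply]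
      rw [hval]
    · rw [List.getElem?_eq_none (by omega : ts.length ≤ j)]
      simp

-- ===== VERDICT (by name: the statement is the Claim_ definition above) =====
theorem assign_saved_prompts_to_selected_topics_py_spec : Claim_equal_assign_saved_prompts_to_selected_topics_py := by
  intro prompt_texts topics _ hpre
  exact pv_main prompt_texts topics hpre
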